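-- pv_equiv track=rewrite | github.com/codref/pawnai | pawn_agent/utils/siyuan.py | infer_title
-- ===== SOURCE A (Python) =====
-- def infer_title(content: str, fallback: str) -> str:
--     """Infer a document title from Markdown content.
--
--     Returns the text of the first ``# Heading``, or the first non-empty
--     non-heading line (truncated to 80 chars), or *fallback* if content is empty.
--     """
--     first_text: str | None = None
--     for line in content.splitlines():
--         stripped = line.strip()
--         if not stripped:
--             continue
--         if stripped.startswith("# "):
--             return stripped[2:].strip()
--         if first_text is None and not stripped.startswith("#"):
--             first_text = stripped[:80]
--     return first_text or fallback
-- ===== SOURCE B (Python) =====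
-- def infer_title(content: str, fallback: str) -> str:
--     """Infer a document title: two independent scans over the stripped lines."""
--     lines = [line.strip() for line in content.splitlines()]
--     heading = next((l[2:].strip() for l in lines if l.startswith("# ")), None)
--     if heading is not None:
--         return heading
--     text = next((l[:80] for l in lines if l and not l.startswith("#")), None)
--     return text if text is not None else fallback
-- ===== Notes on version B (the rewrite author's own statement) =====
-- stated objective: simpler
-- what changed: A's single early-exit loop with a first_text accumulator is replaced by two independent generator scans over the pre-stripped lines (first '# ' heading, else first non-empty non-'#' line), with no mutable state.
import Mathlib
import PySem

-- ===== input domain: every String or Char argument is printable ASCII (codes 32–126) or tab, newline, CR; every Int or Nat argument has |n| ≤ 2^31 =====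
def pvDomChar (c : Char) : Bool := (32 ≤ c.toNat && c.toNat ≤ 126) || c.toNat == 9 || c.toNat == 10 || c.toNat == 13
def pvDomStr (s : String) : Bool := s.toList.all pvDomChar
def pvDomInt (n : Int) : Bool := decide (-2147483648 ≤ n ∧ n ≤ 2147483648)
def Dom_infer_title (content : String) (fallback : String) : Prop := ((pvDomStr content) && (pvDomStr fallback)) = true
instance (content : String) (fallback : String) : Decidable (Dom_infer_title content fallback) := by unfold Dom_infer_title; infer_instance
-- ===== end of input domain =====

-- B replaces A's single early-exit loop with a first_text accumulator by two
-- independent scans over the pre-stripped lines (objective: simpler).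

-- ===== PORT A =====
-- A's loop: early return on '# ' heading, first_text accumulator, `first_text or fallback`.
def inferLoopA (ls : List String) (first_text : Option String) (fallback : String) : String :=
  match ls with
  | [] =>
    -- `return first_text or fallback`
    match first_text with
    | some t => if t = "" then fallback else t
    | none => fallback
  | line :: rest =>
    let stripped := PySem.Str.strip line
    if stripped = "" then inferLoopA rest first_text fallback
    else if PySem.Str.startswith stripped "# " then
      PySem.Str.strip (PySem.Str.slice stripped (some 2) none)
    else if first_text.isNone && !(PySem.Str.startswith stripped "#") then
      inferLoopA rest (some (PySem.Str.slice stripped none (some 80))) fallback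
    else inferLoopA rest first_text fallback

def infer_title (content : String) (fallback : String) : String :=
  inferLoopA (PySem.Str.splitlines content) none fallback

-- ===== PORT B =====
def infer_title_alt (content : String) (fallback : String) : String :=
  let lines := (PySem.Str.splitlines content).map PySem.Str.strip
  match lines.find? (fun l => PySem.Str.startswith l "# ") with
  | some l => PySem.Str.strip (PySem.Str.slice l (some 2) none)
  | none =>
    match lines.find? (fun l => l != "" && !(PySem.Str.startswith l "#")) with
    | some l => PySem.Str.slice l none (some 80)
    | none => fallback

-- ===== PRECONDITION & SPEC =====
def Spec_infer_title (content : String) (fallback : String) (out : String) : Prop := out = infer_title_alt content fallback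
instance (content : String) (fallback : String) (out : String) : Decidable (Spec_infer_title content fallback out) := by unfold Spec_infer_title; infer_instance

-- ===== CLAIM (what is proved, stated in full; the proofs are below) =====
def Claim_equal_infer_title : Prop := ∀ (content : String) (fallback : String), Dom_infer_title content fallback → Spec_infer_title content fallback (infer_title content fallback)

-- ===== LEMMAS AND PROOFS =====

-- the two scan predicates of B, named for the proofs
def headP (l : String) : Bool := PySem.Str.startswith l "# "
def textP (l : String) : Bool := l != "" && !(PySem.Str.startswith l "#")

-- the value B computes from a stripped-line list, with A's pending first_text state
def altResult (ss : List String) (ft : Option String) (fallback : String) : String :=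
  match ss.find? headP with
  | some l => PySem.Str.strip (PySem.Str.slice l (some 2) none)
  | none =>
    match ft with
    | some t => t
    | none =>
      match ss.find? textP with
      | some l => PySem.Str.slice l none (some 80)
      | none => fallback

lemma slice80_ne_empty (s : String) (h : s ≠ "") : PySem.Str.slice s none (some 80) ≠ "" := by
  intro hc
  apply h
  have h1 : (PySem.Str.slice s none (some 80)).toList = s.toList.take (Int.toNat 80) := by
    rw [PySem.Str.toList_slice, PySem.Chars.slice_eq_listSlice,
      PySem.List.slice_to s.toList (by norm_num)]
  rw [hc] at h1
  have h2 : s.toList = [] := by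
    cases he : s.toList with
    | nil => rfl
    | cons a l => rw [he] at h1; simp at h1
  cases s; simp_all

lemma loopA_eq_alt (ls : List String) (ft : Option String) (fallback : String)
    (hft : ∀ t, ft = some t → t ≠ "") :
    inferLoopA ls ft fallback = altResult (ls.map PySem.Str.strip) ft fallback := by
  induction ls generalizing ft with
  | nil =>
    simp only [inferLoopA, altResult, List.map_nil, List.find?_nil]
    cases ft with
    | none => rfl
    | some t =>
      have := hft t rfl
      simp [this]
  | cons line rest ih =>
    simp only [inferLoopA, List.map_cons]
    by_cases he : PySem.Str.strip line = ""
    · rw [if_pos he, ih ft hft]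
      have h1 : headP (PySem.Str.strip line) = false := by rw [headP, he]; decide
      have h2 : textP (PySem.Str.strip line) = false := by rw [textP, he]; decide
      simp only [altResult, List.find?_cons_of_neg (p := headP) (by rw [h1]; exact Bool.false_ne_true),
        List.find?_cons_of_neg (p := textP) (by rw [h2]; exact Bool.false_ne_true)]
    · rw [if_neg he]
      by_cases hh : PySem.Str.startswith (PySem.Str.strip line) "# " = true
      · have h1 : headP (PySem.Str.strip line) = true := hh
        rw [if_pos hh]
        simp only [altResult, List.find?_cons_of_pos (p := headP) h1]
      · have hh' : PySem.Str.startswith (PySem.Str.strip line) "# " = false :=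
          Bool.eq_false_iff.mpr hh
        have h1 : headP (PySem.Str.strip line) = false := hh'
        rw [if_neg (by rw [hh']; exact Bool.false_ne_true)]
        by_cases hp : PySem.Str.startswith (PySem.Str.strip line) "#" = true
        · -- '#…' but not '# ': skipped by both scans, first_text untouched
          have h2 : textP (PySem.Str.strip line) = false := by rw [textP, hp]; simp
          rw [if_neg (by rw [hp]; simp), ih ft hft]
          simp only [altResult, List.find?_cons_of_neg (p := headP) (by rw [h1]; exact Bool.false_ne_true),
            List.find?_cons_of_neg (p := textP) (by rw [h2]; exact Bool.false_ne_true)]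
        · have hp' : PySem.Str.startswith (PySem.Str.strip line) "#" = false :=
            Bool.eq_false_iff.mpr hp
          cases ft with
          | some t =>
            rw [if_neg (by simp), ih (some t) hft]
            simp only [altResult, List.find?_cons_of_neg (p := headP) (by rw [h1]; exact Bool.false_ne_true)]
          | none =>
            have h2 : textP (PySem.Str.strip line) = true := by
              rw [textP, hp']
              simp [he]
            rw [if_pos (by rw [hp']; simp), ih (some (PySem.Str.slice (PySem.Str.strip line) none (some 80)))
              (by intro t ht; injection ht with ht; subst ht; exact slice80_ne_empty _ he)]
            simp only [altResult, List.find?_cons_of_neg (p := headP) (by rw [h1]; exact Bool.false_ne_true),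
              List.find?_cons_of_pos (p := textP) h2]

-- ===== VERDICT (by name: the statement is the Claim_ definition above) =====
theorem infer_title_spec : Claim_equal_infer_title := by
  intro content fallback _
  unfold Spec_infer_title infer_title infer_title_alt
  rw [loopA_eq_alt _ none fallback (by intro t ht; cases ht)]
  rfl
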